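-- pv_equiv track=rewrite | github.com/danielmigueltejedor/BPS-plus | custom_components/bps_plus/__init__.py | collapse_repeated_target
-- ===== SOURCE A (Python) =====
-- def collapse_repeated_target(target: str) -> str:
--     """Collapse recursively repeated targets: a_b_a_b -> a_b."""
--     current = target
--     while True:
--         parts = current.split("_")
--         if len(parts) < 2 or len(parts) % 2 != 0:
--             return current
--         half = len(parts) // 2
--         if parts[:half] != parts[half:]:
--             return current
--         current = "_".join(parts[:half])
-- ===== SOURCE B (Python) =====
-- def collapse_repeated_target(target: str) -> str:
--     """Collapse recursively repeated targets: a_b_a_b -> a_b."""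
--     parts = target.split("_")
--     n = len(parts)
--     m = n
--     while m % 2 == 0:
--         m //= 2
--     # m is now the odd part of n; try the power-of-two period lengths bottom-up
--     while m < n:
--         if parts[:m] * (n // m) == parts:
--             return "_".join(parts[:m])
--         m *= 2
--     return target
-- ===== Notes on version B (the rewrite author's own statement) =====
-- stated objective: alternative
-- what changed: A repeatedly halves the split list comparing first half to second half and rebuilding the string each pass; B computes the odd part of the part count and then tests candidate power-of-two periods bottom-up (smallest first) with a whole-list replication check parts[:m]*(n//m)==parts, joining once.
import Mathlib
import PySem

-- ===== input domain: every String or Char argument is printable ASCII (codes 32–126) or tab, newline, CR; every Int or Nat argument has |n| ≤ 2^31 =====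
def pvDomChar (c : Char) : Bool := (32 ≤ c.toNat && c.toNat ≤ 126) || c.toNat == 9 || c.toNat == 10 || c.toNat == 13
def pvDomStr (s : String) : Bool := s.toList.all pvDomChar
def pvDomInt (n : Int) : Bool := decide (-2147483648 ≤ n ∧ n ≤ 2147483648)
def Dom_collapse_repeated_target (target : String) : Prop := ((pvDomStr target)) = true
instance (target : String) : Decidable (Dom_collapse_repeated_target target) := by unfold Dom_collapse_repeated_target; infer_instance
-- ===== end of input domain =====

-- B replaces A's repeated half-vs-half comparisons (rebuilding the string each pass) by computing
-- the odd part of the part count and testing candidate power-of-two periods bottom-up with a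
-- whole-list replication check (objective: alternative algorithm, same observable result).

-- ===== PORT A =====
-- A's `while True` loop; the fuel `target.length + 1` bounds the iteration count (each pass the
-- current string strictly shrinks, and the part count n ≤ length + 1 halves each pass); the
-- fuel-0 branch is a totality guard only. `parts.take half` / `parts.drop half` are exact for the
-- in-range nonnegative slices parts[:half] / parts[half:].
def collapse_repeated_target_go (fuel : Nat) (current : String) : String :=
  match fuel with
  | 0 => current
  | fuel + 1 =>
    let parts := PySem.Chars.splitOn current.toList ['_']
    if parts.length < 2 ∨ parts.length % 2 ≠ 0 then current
    else
      let half := parts.length / 2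
      if parts.take half ≠ parts.drop half then current
      else collapse_repeated_target_go fuel (String.ofList (PySem.Chars.join ['_'] (parts.take half)))

def collapse_repeated_target (target : String) : String :=
  collapse_repeated_target_go (target.toList.length + 1) target

-- ===== PORT B =====
-- B's first loop `while m % 2 == 0: m //= 2`; the `m ≠ 0` conjunct is a totality guard only
-- (in Source B, m starts at len(parts) ≥ 1, so it is always positive).
def oddPart (m : Nat) : Nat :=
  if h : m % 2 = 0 ∧ m ≠ 0 then oddPart (m / 2) else m
termination_by m
decreasing_by exact Nat.div_lt_self (Nat.pos_of_ne_zero h.2) (by norm_num)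

-- B's second loop `while m < n: if parts[:m] * (n // m) == parts: return …; m *= 2`;
-- `(List.replicate (n / m) (parts.take m)).flatten` is exact for `parts[:m] * (n // m)`
-- (in-range slice, list repetition); the `m ≠ 0` conjunct is a totality guard only.
def bScan (target : String) (parts : List (List Char)) (n m : Nat) : String :=
  if h : m < n ∧ m ≠ 0 then
    if (List.replicate (n / m) (parts.take m)).flatten = parts then
      String.ofList (PySem.Chars.join ['_'] (parts.take m))
    else bScan target parts n (2 * m)
  else target
termination_by n - m
decreasing_by omega

def collapse_repeated_target_alt (target : String) : String :=
  let parts := PySem.Chars.splitOn target.toList ['_']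
  let n := parts.length
  bScan target parts n (oddPart n)

-- ===== PRECONDITION & SPEC =====
def Spec_collapse_repeated_target (target : String) (out : String) : Prop := out = collapse_repeated_target_alt target
instance (target : String) (out : String) : Decidable (Spec_collapse_repeated_target target out) := by unfold Spec_collapse_repeated_target; infer_instance

-- ===== CLAIM (what is proved, stated in full; the proofs are below) =====
def Claim_equal_collapse_repeated_target : Prop := ∀ (target : String), Dom_collapse_repeated_target target → Spec_collapse_repeated_target target (collapse_repeated_target target)

-- ===== LEMMAS AND PROOFS =====

-- Proof-side helper: the index computed by A's halving loop over the fixed parts list.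
def bHalve (parts : List (List Char)) (m : Nat) : Nat :=
  if h : m % 2 = 0 ∧ m ≠ 0 ∧ parts.take (m / 2) = (parts.take m).drop (m / 2) then
    bHalve parts (m / 2)
  else m
termination_by m
decreasing_by exact Nat.div_lt_self (Nat.pos_of_ne_zero h.2.1) (by norm_num)

-- PySem.Chars.splitOn with a one-character separator is Mathlib's List.splitOn.
theorem chars_splitOn_go_spec (c : Char) :
    ∀ (fuel : Nat) (l cur : List Char) (acc : List (List Char)), l.length < fuel →
      PySem.Chars.splitOn.go [c] fuel l cur acc
        = acc.reverse ++ (l.splitOn c).modifyHead (cur.reverse ++ ·) := by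
  intro fuel
  induction fuel with
  | zero => intro l cur acc h; omega
  | succ fuel ih =>
    intro l cur acc h
    cases l with
    | nil =>
      simp [PySem.Chars.splitOn.go, List.splitOn_nil]
    | cons x rest =>
      by_cases hx : x = c
      · subst hx
        have : [x].isPrefixOf (x :: rest) = true := by simp [List.isPrefixOf]
        simp only [PySem.Chars.splitOn.go, this, if_pos]
        rw [ih _ _ _ (by simpa using Nat.lt_of_succ_lt_succ h)]
        simp only [List.splitOn, List.splitOnP_cons, BEq.rfl, if_pos, List.reverse_cons,
          List.append_assoc, List.singleton_append, List.modifyHead_cons]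
        cases hsp : List.splitOnP (fun y => y == x) rest with
        | nil => exact absurd hsp (List.splitOnP_ne_nil _ _)
        | cons hd tl => simp [hsp]
      · have : [c].isPrefixOf (x :: rest) = false := by
          simp [List.isPrefixOf]; exact fun hh => absurd hh.symm hx
        simp only [PySem.Chars.splitOn.go, this, Bool.false_eq_true, if_false]
        rw [ih _ _ _ (by simpa using Nat.lt_of_succ_lt_succ h)]
        have hx' : (x == c) = false := by simp [hx]
        simp only [List.splitOn, List.splitOnP_cons, hx', if_neg Bool.false_ne_true]
        cases hsp : List.splitOnP (· == c) rest with
        | nil => exact absurd hsp (List.splitOnP_ne_nil _ _)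
        | cons hd tl => simp

theorem chars_splitOn_single (c : Char) (l : List Char) :
    PySem.Chars.splitOn l [c] = l.splitOn c := by
  have := chars_splitOn_go_spec c (l.length + 1) l [] [] (by omega)
  rw [PySem.Chars.splitOn, this]
  cases hsp : l.splitOn c with
  | nil => exact absurd hsp (by simp [List.splitOn]; exact List.splitOnP_ne_nil _ _)
  | cons hd tl => simp

theorem splitOn_ne_nil (c : Char) (l : List Char) : l.splitOn c ≠ [] := by
  simp [List.splitOn]; exact List.splitOnP_ne_nil _ _

theorem not_mem_of_mem_splitOn (c : Char) :
    ∀ (l : List Char), ∀ p ∈ l.splitOn c, c ∉ p := by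
  intro l
  induction l with
  | nil => simp [List.splitOn, List.splitOnP, List.splitOnP.go]
  | cons x rest ih =>
    intro p hp
    simp only [List.splitOn] at hp ih
    rw [List.splitOnP_cons] at hp
    by_cases hx : x = c
    · simp [hx] at hp
      rcases hp with hp | hp
      · simp [hp]
      · exact ih p hp
    · have hx' : (x == c) = false := by simp [hx]
      simp only [hx', if_neg Bool.false_ne_true] at hp
      cases hsp : List.splitOnP (· == c) rest with
      | nil => exact absurd hsp (List.splitOnP_ne_nil _ _)
      | cons hd tl =>
        rw [hsp] at hp
        simp at hp
        rcases hp with hp | hp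
        · subst hp
          intro hc
          rcases List.mem_cons.mp hc with hc | hc
          · exact hx hc.symm
          · exact ih hd (by rw [hsp]; exact List.mem_cons_self) hc
        · exact ih p (by rw [hsp]; exact List.mem_cons_of_mem _ hp)

theorem length_splitOn_le (c : Char) (l : List Char) :
    (l.splitOn c).length ≤ l.length + 1 := by
  induction l with
  | nil => simp [List.splitOn, List.splitOnP, List.splitOnP.go]
  | cons x rest ih =>
    simp only [List.splitOn] at ih ⊢
    rw [List.splitOnP_cons]
    by_cases hx : (x == c) = true
    · simp [hx]; omega
    · simp [hx]; omega

theorem bHalve_le (parts : List (List Char)) (m : Nat) : bHalve parts m ≤ m := by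
  induction m using Nat.strong_induction_on with
  | _ m ih =>
    rw [bHalve]
    split
    · next h =>
      have hlt : m / 2 < m := Nat.div_lt_self (Nat.pos_of_ne_zero h.2.1) (by norm_num)
      exact le_of_lt (lt_of_le_of_lt (ih _ hlt) hlt)
    · exact le_rfl

theorem bHalve_pos (parts : List (List Char)) (m : Nat) (hm : 0 < m) :
    0 < bHalve parts m := by
  induction m using Nat.strong_induction_on with
  | _ m ih =>
    rw [bHalve]
    split
    · next h =>
      exact ih _ (Nat.div_lt_self hm (by norm_num)) (Nat.pos_of_ne_zero (by
        intro h0; omega))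
    · exact hm

theorem bHalve_congr (m : Nat) :
    ∀ (parts parts' : List (List Char)), parts.take m = parts'.take m →
      bHalve parts m = bHalve parts' m := by
  induction m using Nat.strong_induction_on with
  | _ m ih =>
    intro parts parts' hte
    have htk : ∀ k, k ≤ m → parts.take k = parts'.take k := by
      intro k hk
      have h1 : parts.take k = (parts.take m).take k := by
        rw [List.take_take, Nat.min_eq_left hk]
      have h2 : parts'.take k = (parts'.take m).take k := by
        rw [List.take_take, Nat.min_eq_left hk]
      rw [h1, h2, hte]
    have hcond : (m % 2 = 0 ∧ m ≠ 0 ∧ parts.take (m / 2) = (parts.take m).drop (m / 2))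
        ↔ (m % 2 = 0 ∧ m ≠ 0 ∧ parts'.take (m / 2) = (parts'.take m).drop (m / 2)) := by
      constructor <;> intro h <;>
        refine ⟨h.1, h.2.1, ?_⟩
      · rw [← htk (m / 2) (Nat.div_le_self m 2), ← hte, h.2.2]
      · rw [htk (m / 2) (Nat.div_le_self m 2), hte, h.2.2]
    by_cases h : m % 2 = 0 ∧ m ≠ 0 ∧ parts.take (m / 2) = (parts.take m).drop (m / 2)
    · rw [bHalve, dif_pos h]
      conv_rhs => rw [bHalve]
      rw [dif_pos (hcond.mp h)]
      exact ih _ (Nat.div_lt_self (Nat.pos_of_ne_zero h.2.1) (by norm_num)) _ _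
        (htk (m / 2) (Nat.div_le_self m 2))
    · rw [bHalve, dif_neg h]
      conv_rhs => rw [bHalve]
      rw [dif_neg (fun h' => h (hcond.mpr h'))]

-- A's halving loop on the joined string computes join(take (bHalve ps |ps|)).
theorem main_loop (c : Char) (hc : c = '_') :
    ∀ (fuel : Nat) (ps : List (List Char)), ps ≠ [] → (∀ p ∈ ps, c ∉ p) →
      ps.length ≤ fuel →
      collapse_repeated_target_go fuel (String.ofList (PySem.Chars.join [c] ps))
        = String.ofList (PySem.Chars.join [c] (ps.take (bHalve ps ps.length))) := by
  subst hc
  intro fuel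
  induction fuel with
  | zero =>
    intro ps hne hmem hlen
    exact absurd (List.length_eq_zero_iff.mp (Nat.le_zero.mp hlen)) hne
  | succ fuel ih =>
    intro ps hne hmem hlen
    have hps : PySem.Chars.splitOn (String.ofList (PySem.Chars.join ['_'] ps)).toList ['_'] = ps := by
      rw [String.toList_ofList, chars_splitOn_single]
      exact List.splitOn_intercalate ps '_' hmem hne
    have hpos : 0 < ps.length := List.length_pos_iff.mpr hne
    rw [collapse_repeated_target_go]
    simp only [hps]
    by_cases h1 : ps.length < 2 ∨ ps.length % 2 ≠ 0
    · rw [if_pos h1]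
      have hodd : ps.length % 2 ≠ 0 := by
        rcases h1 with h1 | h1
        · omega
        · exact h1
      rw [bHalve, dif_neg (by tauto), List.take_of_length_le le_rfl]
    · rw [if_neg h1]
      push Not at h1
      obtain ⟨hge, heven⟩ := h1
      by_cases h2 : ps.take (ps.length / 2) ≠ ps.drop (ps.length / 2)
      · rw [if_pos h2]
        rw [bHalve, dif_neg, List.take_of_length_le le_rfl]
        intro hcon
        exact h2 (by rw [hcon.2.2, List.take_of_length_le le_rfl])
      · rw [if_neg h2]
        push Not at h2
        set half := ps.length / 2 with hhalf
        have hhpos : 0 < half := by omega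
        have hhlt : half < ps.length := Nat.div_lt_self hpos (by norm_num)
        have hps' : (ps.take half).length = half := by
          rw [List.length_take]; omega
        have hne' : ps.take half ≠ [] := by
          intro hcon; rw [hcon] at hps'; simp at hps'; omega
        have hmem' : ∀ p ∈ ps.take half, '_' ∉ p := fun p hp => hmem p (List.mem_of_mem_take hp)
        have hlen' : (ps.take half).length ≤ fuel := by omega
        rw [ih (ps.take half) hne' hmem' hlen', hps']
        have hcongr : bHalve (ps.take half) half = bHalve ps half :=
          bHalve_congr half _ _ (by rw [List.take_take, Nat.min_self])
        have hstep : bHalve ps ps.length = bHalve ps half := by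
          rw [bHalve]
          rw [dif_pos ⟨heven, by omega, by rw [List.take_of_length_le le_rfl]; exact h2⟩]
        rw [hcongr, ← hstep]
        have hble : bHalve ps ps.length ≤ half := by rw [hstep]; exact bHalve_le ps half
        rw [List.take_take, Nat.min_eq_left hble]

-- the bHalve chain composes to a power-of-two replication of the final prefix
theorem bHalve_chain (m : Nat) (ps : List (List Char)) :
    ∃ j, bHalve ps m * 2 ^ j = m ∧
      ps.take m = (List.replicate (2 ^ j) (ps.take (bHalve ps m))).flatten := by
  induction m using Nat.strong_induction_on with
  | _ m ih =>
    rw [bHalve]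
    split
    · next h =>
      obtain ⟨heven, hne, hco⟩ := h
      obtain ⟨j, hj, hrep⟩ := ih (m / 2) (Nat.div_lt_self (Nat.pos_of_ne_zero hne) (by norm_num))
      refine ⟨j + 1, ?_, ?_⟩
      · rw [pow_succ, ← Nat.mul_assoc, hj]; omega
      · have hsplit : ps.take m = ps.take (m / 2) ++ ps.take (m / 2) := by
          conv_lhs => rw [← List.take_append_drop (m / 2) (ps.take m)]
          rw [List.take_take, Nat.min_eq_left (Nat.div_le_self m 2), ← hco]
        rw [hsplit, hrep,
          show (2 : Nat) ^ (j + 1) = 2 ^ j + 2 ^ j by rw [pow_succ]; omega,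
          List.replicate_add, List.flatten_append]
    · exact ⟨0, by simp, by simp⟩

-- a power-of-two replication prefix forces the halving chain all the way down
theorem repl_le (i : Nat) : ∀ (s : Nat) (ps : List (List Char)), s ≠ 0 →
    s * 2 ^ i ≤ ps.length →
    ps.take (s * 2 ^ i) = (List.replicate (2 ^ i) (ps.take s)).flatten →
    bHalve ps (s * 2 ^ i) ≤ s := by
  induction i with
  | zero =>
    intro s ps _ _ _
    simpa using bHalve_le ps s
  | succ i ih =>
    intro s ps hs hlen hrep
    have hm2 : s * 2 ^ (i + 1) / 2 = s * 2 ^ i := by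
      rw [pow_succ, ← Nat.mul_assoc]; omega
    have hsle : s ≤ ps.length := by
      have : s * 1 ≤ s * 2 ^ (i + 1) := Nat.mul_le_mul_left s (Nat.one_le_two_pow)
      omega
    have hlens : (ps.take s).length = s := by rw [List.length_take]; omega
    have hLlen : ((List.replicate (2 ^ i) (ps.take s)).flatten).length = s * 2 ^ i := by
      rw [List.length_flatten, List.map_replicate, List.sum_replicate, smul_eq_mul, hlens]
      ring
    have hsplit2 : (List.replicate (2 ^ (i + 1)) (ps.take s)).flatten
        = (List.replicate (2 ^ i) (ps.take s)).flatten
          ++ (List.replicate (2 ^ i) (ps.take s)).flatten := by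
      rw [show (2 : Nat) ^ (i + 1) = 2 ^ i + 2 ^ i by rw [pow_succ]; omega,
        List.replicate_add, List.flatten_append]
    set L := (List.replicate (2 ^ i) (ps.take s)).flatten with hL
    have htkL : ps.take (s * 2 ^ i) = L := by
      have h1 : ps.take (s * 2 ^ i) = (ps.take (s * 2 ^ (i + 1))).take (s * 2 ^ i) := by
        rw [List.take_take, Nat.min_eq_left]
        rw [pow_succ, ← Nat.mul_assoc]
        exact Nat.le_mul_of_pos_right _ (by norm_num)
      rw [h1, hrep, hsplit2, ← hLlen, List.take_left]
    have hcond : ps.take (s * 2 ^ (i + 1) / 2)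
        = (ps.take (s * 2 ^ (i + 1))).drop (s * 2 ^ (i + 1) / 2) := by
      rw [hm2, htkL, hrep, hsplit2, ← hLlen, List.drop_left]
    rw [bHalve, dif_pos, hm2]
    · exact ih s ps hs (by omega) htkL
    · refine ⟨?_, ?_, hcond⟩
      · rw [pow_succ, ← Nat.mul_assoc]; omega
      · have : 0 < s * 2 ^ (i + 1) :=
          Nat.mul_pos (Nat.pos_of_ne_zero hs) (Nat.two_pow_pos _)
        omega

theorem odd_pow2_unique (i : Nat) : ∀ (k a c : Nat), a % 2 = 1 → c % 2 = 1 →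
    a * 2 ^ i = c * 2 ^ k → a = c ∧ i = k := by
  induction i with
  | zero =>
    intro k a c ha hc h
    cases k with
    | zero => simp at h; omega
    | succ k =>
      exfalso
      have : a = c * 2 ^ (k + 1) := by simpa using h
      have : a % 2 = 0 := by
        rw [this, pow_succ, ← Nat.mul_assoc]
        exact Nat.mul_mod_left _ 2
      omega
  | succ i ih =>
    intro k a c ha hc h
    cases k with
    | zero =>
      exfalso
      have : a * 2 ^ (i + 1) = c := by simpa using h
      have : c % 2 = 0 := by
        rw [← this, pow_succ, ← Nat.mul_assoc]
        exact Nat.mul_mod_left _ 2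
      omega
    | succ k =>
      have h' : a * 2 ^ i = c * 2 ^ k := by
        rw [pow_succ, pow_succ, ← Nat.mul_assoc, ← Nat.mul_assoc] at h
        omega
      obtain ⟨h1, h2⟩ := ih k a c ha hc h'
      exact ⟨h1, by omega⟩

theorem oddPart_spec (m : Nat) :
    ∃ t, oddPart m * 2 ^ t = m ∧ (m ≠ 0 → oddPart m % 2 = 1) := by
  induction m using Nat.strong_induction_on with
  | _ m ih =>
    rw [oddPart]
    split
    · next h =>
      obtain ⟨t, ht, hodd⟩ := ih (m / 2) (Nat.div_lt_self (Nat.pos_of_ne_zero h.2) (by norm_num))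
      exact ⟨t + 1, by rw [pow_succ, ← Nat.mul_assoc, ht]; omega,
        fun _ => hodd (by omega)⟩
    · next h =>
      exact ⟨0, by simp, fun hm => by omega⟩

-- ===== VERDICT (by name: the statement is the Claim_ definition above) =====
theorem scan_lemma (target : String) (ps : List (List Char)) (hne : ps ≠ [])
    (hjoin : String.ofList (PySem.Chars.join ['_'] ps) = target) :
    ∀ (k m : Nat), bHalve ps ps.length - m ≤ k →
      (∃ t, oddPart ps.length * 2 ^ t = m) → m ≤ bHalve ps ps.length →
      bScan target ps ps.length m
        = String.ofList (PySem.Chars.join ['_'] (ps.take (bHalve ps ps.length))) := by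
  have hn : 0 < ps.length := List.length_pos_iff.mpr hne
  set n := ps.length with hnn
  set b := bHalve ps n with hb
  have hbpos : 0 < b := bHalve_pos ps n hn
  obtain ⟨j, hj, hrepb⟩ := bHalve_chain n ps
  rw [← hb] at hj hrepb
  have htaken : ps.take n = ps := List.take_of_length_le le_rfl
  obtain ⟨tn, htn, hoddn⟩ := oddPart_spec n
  set o := oddPart n with ho
  have hoo : o % 2 = 1 := hoddn (by omega)
  have hopos : 0 < o := by omega
  obtain ⟨tb, htb, hoddb⟩ := oddPart_spec b
  have hob : oddPart b % 2 = 1 := hoddb (by omega)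
  have huniq : oddPart b = o ∧ tb + j = tn :=
    odd_pow2_unique (tb + j) tn (oddPart b) o hob hoo
      (by rw [pow_add, ← Nat.mul_assoc, htb, hj, htn])
  have hbo : o * 2 ^ tb = b := by rw [← huniq.1]; exact htb
  have hbn : b ≤ n := by
    have : b * 1 ≤ b * 2 ^ j := Nat.mul_le_mul_left b Nat.one_le_two_pow
    omega
  have hndivb : n / b = 2 ^ j := by
    rw [← hj, Nat.mul_div_cancel_left _ hbpos]
  -- the m = b end of the scan
  have base : bScan target ps n b
      = String.ofList (PySem.Chars.join ['_'] (ps.take b)) := by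
    rcases lt_or_eq_of_le hbn with hlt | heq
    · rw [bScan, dif_pos ⟨hlt, by omega⟩, if_pos]
      rw [hndivb, ← hrepb, htaken]
    · rw [bScan, dif_neg (by omega), ← hjoin, heq, htaken]
  intro k
  induction k with
  | zero =>
    intro m hk hex hle
    have : m = b := by omega
    rw [this]; exact base
  | succ k ih =>
    intro m hk hex hle
    rcases lt_or_eq_of_le hle with hlt | heq
    · -- m < b : the replication check fails, double m
      obtain ⟨t, ht⟩ := hex
      have hmpos : 0 < m := by
        rw [← ht]; exact Nat.mul_pos hopos (Nat.two_pow_pos t)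
      have httb : t < tb := by
        by_contra hcon
        push Not at hcon
        have : b ≤ m := by
          rw [← hbo, ← ht]
          exact Nat.mul_le_mul_left o (Nat.pow_le_pow_right (by norm_num) hcon)
        omega
      have httn : t < tn := by omega
      have hmn : m * 2 ^ (tn - t) = n := by
        rw [← ht, Nat.mul_assoc, ← pow_add]
        rw [show t + (tn - t) = tn by omega, htn]
      have hndivm : n / m = 2 ^ (tn - t) := by
        rw [← hmn, Nat.mul_div_cancel_left _ hmpos]
      have hfail : ¬ (List.replicate (n / m) (ps.take m)).flatten = ps := by
        intro heq2
        have := repl_le (tn - t) m ps (by omega) (by rw [hmn])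
          (by rw [hmn, htaken, ← hndivm, heq2])
        rw [hmn] at this
        rw [← hb] at this
        omega
      have h2m : 2 * m ≤ b := by
        rw [← hbo, ← ht, show 2 * (o * 2 ^ t) = o * 2 ^ (t + 1) by rw [pow_succ]; ring]
        exact Nat.mul_le_mul_left o (Nat.pow_le_pow_right (by norm_num) (by omega))
      rw [bScan, dif_pos ⟨by omega, by omega⟩, if_neg hfail]
      exact ih (2 * m) (by omega)
        ⟨t + 1, by rw [← ht, pow_succ]; ring⟩ h2m
    · rw [heq]; exact base

theorem collapse_repeated_target_spec : Claim_equal_collapse_repeated_target := by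
  intro target _
  unfold Spec_collapse_repeated_target collapse_repeated_target collapse_repeated_target_alt
  set ps := PySem.Chars.splitOn target.toList ['_'] with hps
  have hsp : ps = target.toList.splitOn '_' := by rw [hps, chars_splitOn_single]
  have hjoin : String.ofList (PySem.Chars.join ['_'] ps) = target := by
    rw [hsp]
    show String.ofList (List.intercalate ['_'] (target.toList.splitOn '_')) = target
    rw [List.intercalate_splitOn, String.ofList_toList]
  have hne : ps ≠ [] := by rw [hsp]; exact splitOn_ne_nil _ _
  have hmem : ∀ p ∈ ps, '_' ∉ p := by rw [hsp]; exact not_mem_of_mem_splitOn _ _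
  have hlen : ps.length ≤ (String.ofList (PySem.Chars.join ['_'] ps)).toList.length + 1 := by
    rw [hjoin, hsp]; exact length_splitOn_le _ _
  have hA : collapse_repeated_target_go (target.toList.length + 1) target
      = String.ofList (PySem.Chars.join ['_'] (ps.take (bHalve ps ps.length))) := by
    conv_lhs => rw [← hjoin]
    exact main_loop '_' rfl _ ps hne hmem (by simpa using hlen)
  rw [hA]
  have hopos : 0 < oddPart ps.length := by
    obtain ⟨t, ht, hodd⟩ := oddPart_spec ps.length
    have := hodd (by simpa [List.length_pos_iff] using hne)
    omega
  have hob : oddPart ps.length ≤ bHalve ps ps.length := by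
    obtain ⟨tn, htn, hoddn⟩ := oddPart_spec ps.length
    obtain ⟨j, hj, _⟩ := bHalve_chain ps.length ps
    obtain ⟨tb, htb, hoddb⟩ := oddPart_spec (bHalve ps ps.length)
    have hbpos : 0 < bHalve ps ps.length :=
      bHalve_pos ps ps.length (List.length_pos_iff.mpr hne)
    have huniq : oddPart (bHalve ps ps.length) = oddPart ps.length ∧ tb + j = tn :=
      odd_pow2_unique (tb + j) tn _ _ (hoddb (by omega))
        (hoddn (by have := List.length_pos_iff.mpr hne; omega))
        (by rw [pow_add, ← Nat.mul_assoc, htb, hj, htn])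
    calc oddPart ps.length = oddPart ps.length * 1 := by ring
      _ ≤ oddPart ps.length * 2 ^ tb := Nat.mul_le_mul_left _ Nat.one_le_two_pow
      _ = bHalve ps ps.length := by rw [← huniq.1, htb]
  exact (scan_lemma target ps hne hjoin (bHalve ps ps.length) (oddPart ps.length)
    (by omega) ⟨0, by simp⟩ hob).symm
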